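-- pv_equiv track=rewrite | github.com/koukouzasg/AdventOfCode2022 | day8/treeHouse.py | scan_vertically
-- ===== SOURCE A (Python) =====
-- def scan_vertically(treeGrid, treePos):
--     x, y = treePos[0], treePos[1]
--     upper, lower = False, False
--     tree = treeGrid[x][y]
--     for r in range(len(treeGrid)):
--         if r == x:
--             continue
--         if treeGrid[r][y] >= tree:
--             if r < x:
--                 upper = True
--             else:
--                 lower = True
--         if upper and lower:
--             return True
--     return False
-- ===== SOURCE B (Python) =====
-- def scan_vertically(treeGrid, treePos):
--     x, y = treePos[0], treePos[1]
--     tree = treeGrid[x][y]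
--     above = None
--     below = None
--     for r, row in enumerate(treeGrid):
--         v = row[y]
--         if r < x:
--             if above is None or above < v:
--                 above = v
--         elif r > x:
--             if below is None or below < v:
--                 below = v
--     return above is not None and below is not None and above >= tree and below >= tree
-- ===== Notes on version B (the rewrite author's own statement) =====
-- stated objective: alternative
-- what changed: Replaces A's boolean existence flags with early exit by a single aggregation pass that maintains the running maximum of the column above and below the tree and performs the two >= comparisons once at the end.
-- outside the precondition, e.g. on scan_vertically([[9], [5], [9], []], (1, 0)): A returns True, B raises IndexError
import Mathlib
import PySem

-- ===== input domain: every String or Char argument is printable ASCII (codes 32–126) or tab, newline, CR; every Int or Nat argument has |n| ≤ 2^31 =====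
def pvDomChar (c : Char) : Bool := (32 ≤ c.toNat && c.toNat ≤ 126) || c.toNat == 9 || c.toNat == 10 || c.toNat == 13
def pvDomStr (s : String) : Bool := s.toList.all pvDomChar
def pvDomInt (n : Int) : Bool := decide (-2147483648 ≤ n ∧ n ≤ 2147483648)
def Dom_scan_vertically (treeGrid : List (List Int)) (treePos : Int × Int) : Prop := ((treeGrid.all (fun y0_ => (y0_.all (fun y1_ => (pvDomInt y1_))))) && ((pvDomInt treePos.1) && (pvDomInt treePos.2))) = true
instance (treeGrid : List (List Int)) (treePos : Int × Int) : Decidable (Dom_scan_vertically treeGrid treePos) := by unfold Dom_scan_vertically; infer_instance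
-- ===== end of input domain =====

-- B replaces A's boolean existence flags with a single aggregation pass keeping the
-- running maxima of the column above and below the tree, compared once at the end.

-- ===== PORT A =====
-- the 'for r in range(len(treeGrid))' loop of A, carried state (upper, lower);
-- treeGrid[r][y] is ported as the total pyGetD form, exact under Pre_ (in range ⇒ no IndexError)
def scanVertLoop (g : List (List Int)) (y tree x : Int) : List Int → Bool → Bool → Bool
  | [], _, _ => false
  | r :: rs, upper, lower =>
    if r = x then scanVertLoop g y tree x rs upper lower
    else
      let s :=
        if PySem.List.pyGetD (PySem.List.pyGetD g r []) y 0 ≥ tree then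
          if r < x then (true, lower) else (upper, true)
        else (upper, lower)
      if s.1 && s.2 then true else scanVertLoop g y tree x rs s.1 s.2

def scan_vertically (treeGrid : List (List Int)) (treePos : Int × Int) : Bool :=
  let x := treePos.1
  let y := treePos.2
  let tree := PySem.List.pyGetD (PySem.List.pyGetD treeGrid x []) y 0
  scanVertLoop treeGrid y tree x (PySem.List.pyRange 0 treeGrid.length 1) false false

-- ===== PORT B =====
-- 'if above is None or above < v: above = v' — the running-maximum update
def maxUpd (o : Option Int) (v : Int) : Option Int :=
  if o.elim true (fun a => a < v) then some v else o

-- one step of B's 'for r, row in enumerate(treeGrid)' loop, state (above, below)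
def scanAltStep (x y : Int) (s : Option Int × Option Int) (p : Int × List Int) : Option Int × Option Int :=
  let v := PySem.List.pyGetD p.2 y 0
  if p.1 < x then (maxUpd s.1 v, s.2)
  else if x < p.1 then (s.1, maxUpd s.2 v)
  else s

def scan_vertically_alt (treeGrid : List (List Int)) (treePos : Int × Int) : Bool :=
  let x := treePos.1
  let y := treePos.2
  let tree := PySem.List.pyGetD (PySem.List.pyGetD treeGrid x []) y 0
  let s := (PySem.List.enumerate treeGrid 0).foldl (scanAltStep x y) (none, none)
  match s.1, s.2 with
  | some a, some b => decide (a ≥ tree) && decide (b ≥ tree)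
  | _, _ => false

-- ===== PRECONDITION & SPEC =====
-- Pre_ excludes grids with a row too short (or empty) at column y, on which either
-- program can hit an IndexError; on a few such ragged grids A still returns via its
-- early exit before reaching the short row while B (which always reads the whole
-- column) raises — those accidental successes are excluded too (see cites).
def Pre_scan_vertically (treeGrid : List (List Int)) (treePos : Int × Int) : Prop :=
  PySem.Raise.InRange treeGrid.length treePos.1 ∧
  ∀ row ∈ treeGrid, PySem.Raise.InRange row.length treePos.2

instance (treeGrid : List (List Int)) (treePos : Int × Int) : Decidable (Pre_scan_vertically treeGrid treePos) := by
  unfold Pre_scan_vertically; infer_instance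

def pvWitness_scan_vertically : List (List Int) × (Int × Int) := ([[3, 1], [2, 5], [4, 1]], (1, 0))

def Spec_scan_vertically (treeGrid : List (List Int)) (treePos : Int × Int) (out : Bool) : Prop := out = scan_vertically_alt treeGrid treePos
instance (treeGrid : List (List Int)) (treePos : Int × Int) (out : Bool) : Decidable (Spec_scan_vertically treeGrid treePos out) := by unfold Spec_scan_vertically; infer_instance

-- ===== CLAIM (what is proved, stated in full; the proofs are below) =====
def Claim_equal_scan_vertically : Prop := ∀ (treeGrid : List (List Int)) (treePos : Int × Int), Dom_scan_vertically treeGrid treePos → Pre_scan_vertically treeGrid treePos → Spec_scan_vertically treeGrid treePos (scan_vertically treeGrid treePos)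

-- ===== LEMMAS AND PROOFS =====

-- 'the maximum, if any, is ≥ tree'
def chk (tree : Int) (o : Option Int) : Bool := o.elim false (fun a => decide (tree ≤ a))

-- A's loop with monotone flags (never both true on entry) equals the conjunction of
-- two existence scans (with the 'r = x' row contributing to neither side).
theorem scanVertLoop_eq (g : List (List Int)) (y tree x : Int) :
    ∀ (rs : List Int) (u l : Bool), (u && l) = false →
      scanVertLoop g y tree x rs u l =
        ((u || rs.any (fun r => decide (r ≠ x) &&
            decide (PySem.List.pyGetD (PySem.List.pyGetD g r []) y 0 ≥ tree) && decide (r < x))) &&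
         (l || rs.any (fun r => decide (r ≠ x) &&
            decide (PySem.List.pyGetD (PySem.List.pyGetD g r []) y 0 ≥ tree) && decide (x < r)))) := by
  intro rs
  induction rs with
  | nil => intro u l hul; cases u <;> cases l <;> simp_all [scanVertLoop]
  | cons r rs ih =>
    intro u l hul
    by_cases hrx : r = x
    · simp [scanVertLoop, hrx, ih u l hul]
    · by_cases hge : PySem.List.pyGetD (PySem.List.pyGetD g r []) y 0 ≥ tree
      · by_cases hlt : r < x
        · have hxr : ¬ x < r := by omega
          cases l with
          | true => simp [scanVertLoop, hrx, hge, hlt, hxr]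
          | false =>
            have := ih true false (by simp)
            simp [scanVertLoop, hrx, hge, hlt, hxr, this]
        · have hxr : x < r := by omega
          cases u with
          | true => simp [scanVertLoop, hrx, hge, hlt, hxr]
          | false =>
            have := ih false true (by simp)
            simp [scanVertLoop, hrx, hge, hlt, hxr, this]
      · have hge' : decide (PySem.List.pyGetD (PySem.List.pyGetD g r []) y 0 ≥ tree) = false := by
          simpa using hge
        simp only [scanVertLoop, if_neg hrx, if_neg hge, hul, List.any_cons, hge',
          Bool.and_false, Bool.false_and, Bool.false_or, Bool.false_eq_true, if_false]
        exact ih u l hul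

-- checking a running-max update = old check OR the new value passes
theorem chk_maxUpd (tree : Int) (o : Option Int) (v : Int) :
    chk tree (maxUpd o v) = (chk tree o || decide (tree ≤ v)) := by
  cases o with
  | none => simp [chk, maxUpd]
  | some a => by_cases h : a < v <;> simp [chk, maxUpd, h] <;> omega

theorem scanAltStep_lt (x y : Int) (s : Option Int × Option Int) (p : Int × List Int)
    (h : p.1 < x) :
    scanAltStep x y s p = (maxUpd s.1 (PySem.List.pyGetD p.2 y 0), s.2) := by
  simp [scanAltStep, h]

theorem scanAltStep_gt (x y : Int) (s : Option Int × Option Int) (p : Int × List Int)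
    (h : x < p.1) :
    scanAltStep x y s p = (s.1, maxUpd s.2 (PySem.List.pyGetD p.2 y 0)) := by
  have h1 : ¬ p.1 < x := by omega
  simp [scanAltStep, h1, h]

theorem scanAltStep_self (x y : Int) (s : Option Int × Option Int) (p : Int × List Int)
    (h1 : ¬ p.1 < x) (h2 : ¬ x < p.1) :
    scanAltStep x y s p = s := by
  simp [scanAltStep, h1, h2]

-- B's fold over any pair list: the final checks are existence scans
theorem foldl_scanAltStep_chk (x y tree : Int) :
    ∀ (ps : List (Int × List Int)) (oa ob : Option Int),
      (chk tree (ps.foldl (scanAltStep x y) (oa, ob)).1 =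
        (chk tree oa || ps.any (fun p => decide (p.1 < x) && decide (tree ≤ PySem.List.pyGetD p.2 y 0)))) ∧
      (chk tree (ps.foldl (scanAltStep x y) (oa, ob)).2 =
        (chk tree ob || ps.any (fun p => decide (x < p.1) && decide (tree ≤ PySem.List.pyGetD p.2 y 0)))) := by
  intro ps
  induction ps with
  | nil => intro oa ob; simp
  | cons p ps ih =>
    intro oa ob
    by_cases h1 : p.1 < x
    · have h2 : ¬ x < p.1 := by omega
      rw [List.foldl_cons, scanAltStep_lt x y _ p h1]
      have := ih (maxUpd oa (PySem.List.pyGetD p.2 y 0)) ob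
      constructor
      · rw [this.1, chk_maxUpd, List.any_cons]
        simp [h1, Bool.or_assoc]
      · rw [this.2, List.any_cons]
        simp [h2]
    · by_cases h2 : x < p.1
      · rw [List.foldl_cons, scanAltStep_gt x y _ p h2]
        have := ih oa (maxUpd ob (PySem.List.pyGetD p.2 y 0))
        constructor
        · rw [this.1, List.any_cons]
          simp [h1]
        · rw [this.2, chk_maxUpd, List.any_cons]
          simp [h2, Bool.or_assoc]
      · rw [List.foldl_cons, scanAltStep_self x y _ p h1 h2]
        have := ih oa ob
        rw [this.1, this.2, List.any_cons, List.any_cons]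
        simp [h1, h2]

-- the final 'above is not None and below is not None and …' = chk ∧ chk
theorem match_eq_chk (tree : Int) (s : Option Int × Option Int) :
    (match s.1, s.2 with
      | some a, some b => decide (a ≥ tree) && decide (b ≥ tree)
      | _, _ => false) = (chk tree s.1 && chk tree s.2) := by
  obtain ⟨o1, o2⟩ := s
  cases o1 <;> cases o2 <;> simp [chk]

theorem any_congr_mem {α : Type} (L : List α) (f h : α → Bool)
    (hfg : ∀ a ∈ L, f a = h a) : L.any f = L.any h := by
  induction L with
  | nil => rfl
  | cons a L ih =>
    simp only [List.any_cons, hfg a (List.mem_cons_self), ih (fun b hb => hfg b (List.mem_cons_of_mem a hb))]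

theorem scan_vertically_spec_aux (treeGrid : List (List Int)) (treePos : Int × Int) :
    scan_vertically treeGrid treePos = scan_vertically_alt treeGrid treePos := by
  obtain ⟨x, y⟩ := treePos
  unfold scan_vertically scan_vertically_alt
  simp only []
  set tree := PySem.List.pyGetD (PySem.List.pyGetD treeGrid x []) y 0 with htree
  rw [scanVertLoop_eq _ _ _ _ _ _ _ (by simp), match_eq_chk,
    (foldl_scanAltStep_chk x y tree (PySem.List.enumerate treeGrid) none none).1,
    (foldl_scanAltStep_chk x y tree (PySem.List.enumerate treeGrid) none none).2,
    PySem.List.enumerate_eq_map_pyRange treeGrid ([] : List Int), List.any_map, List.any_map]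
  simp only [chk, Option.elim, Bool.false_or, PySem.List.len]
  congr 1
  · apply any_congr_mem
    intro r _
    by_cases h : r < x
    · have h2 : r ≠ x := by omega
      simp [h, h2, ge_iff_le]
    · simp [h]
  · apply any_congr_mem
    intro r _
    by_cases h : x < r
    · have h2 : r ≠ x := by omega
      simp [h, h2, ge_iff_le]
    · simp [h]

-- ===== VERDICT (by name: the statement is the Claim_ definition above) =====
theorem scan_vertically_spec : Claim_equal_scan_vertically := by
  intro treeGrid treePos _ _
  unfold Spec_scan_vertically
  exact scan_vertically_spec_aux treeGrid treePos
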